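-- pv_equiv track=rewrite | github.com/larryflorio/LarryBot2 | scripts/command_redundancy_analysis.py | identify_redundancies
-- ===== SOURCE A (Python) =====
-- from collections import defaultdict
-- from typing import Dict, List, Tuple, Set
--
-- def identify_redundancies(commands: List[Dict]) -> Dict:
--     """Identify redundant command patterns."""
--     redundancies = {
--         'task_creation': [],
--         'task_listing': [],
--         'search_commands': [],
--         'analytics_hierarchy': [],
--         'namespace_conflicts': [],
--         'similar_functionality': []
--     }
--
--     # Group commands by name patterns
--     command_groups = defaultdict(list)
--     for cmd in commands:
--         command_groups[cmd['command']].append(cmd)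
--
--     # Task creation redundancy
--     add_commands = [cmd for cmd in commands if cmd['command'] in ['/add', '/addtask']]
--     if len(add_commands) >= 2:
--         redundancies['task_creation'] = add_commands
--
--     # Task listing redundancy
--     list_commands = [cmd for cmd in commands if cmd['command'] in ['/list', '/tasks']]
--     if len(list_commands) >= 2:
--         redundancies['task_listing'] = list_commands
--
--     # Search redundancy
--     search_commands = [cmd for cmd in commands if cmd['command'] in ['/search', '/search_advanced']]
--     if len(search_commands) >= 2:
--         redundancies['search_commands'] = search_commands
--
--     # Analytics hierarchy
--     analytics_commands = [cmd for cmd in commands if '/analytics' in cmd['command']]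
--     if len(analytics_commands) >= 2:
--         redundancies['analytics_hierarchy'] = analytics_commands
--
--     # Namespace conflicts (multiple commands with same name)
--     for cmd_name, cmd_list in command_groups.items():
--         if len(cmd_list) > 1:
--             redundancies['namespace_conflicts'].extend(cmd_list)
--
--     # Similar functionality patterns
--     bulk_commands = [cmd for cmd in commands if cmd['command'].startswith('/bulk_')]
--     if len(bulk_commands) >= 3:  # If 3+ bulk commands, suggest consolidation
--         redundancies['similar_functionality'].extend(bulk_commands)
--
--     return redundancies
-- ===== SOURCE B (Python) =====
-- def identify_redundancies(commands):
--     """Identify redundant command patterns (single pass over commands)."""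
--     adds, lists_, searches, analytics, bulks = [], [], [], [], []
--     groups = {}
--     for cmd in commands:
--         name = cmd['command']
--         if name in ('/add', '/addtask'):
--             adds.append(cmd)
--         if name in ('/list', '/tasks'):
--             lists_.append(cmd)
--         if name in ('/search', '/search_advanced'):
--             searches.append(cmd)
--         if '/analytics' in name:
--             analytics.append(cmd)
--         if name.startswith('/bulk_'):
--             bulks.append(cmd)
--         groups.setdefault(name, []).append(cmd)
--     conflicts = []
--     for group in groups.values():
--         if len(group) > 1:
--             conflicts.extend(group)
--     return {
--         'task_creation': adds if len(adds) >= 2 else [],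
--         'task_listing': lists_ if len(lists_) >= 2 else [],
--         'search_commands': searches if len(searches) >= 2 else [],
--         'analytics_hierarchy': analytics if len(analytics) >= 2 else [],
--         'namespace_conflicts': conflicts,
--         'similar_functionality': bulks if len(bulks) >= 3 else [],
--     }
-- ===== Notes on version B (the rewrite author's own statement) =====
-- stated objective: alternative
-- what changed: B replaces A's six independent scans of the command list (five comprehensions plus a separate grouping loop) with a single pass that fills all five category accumulators and the name-to-group table together, then applies the threshold gates when assembling the result dict directly.
import Mathlib
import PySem

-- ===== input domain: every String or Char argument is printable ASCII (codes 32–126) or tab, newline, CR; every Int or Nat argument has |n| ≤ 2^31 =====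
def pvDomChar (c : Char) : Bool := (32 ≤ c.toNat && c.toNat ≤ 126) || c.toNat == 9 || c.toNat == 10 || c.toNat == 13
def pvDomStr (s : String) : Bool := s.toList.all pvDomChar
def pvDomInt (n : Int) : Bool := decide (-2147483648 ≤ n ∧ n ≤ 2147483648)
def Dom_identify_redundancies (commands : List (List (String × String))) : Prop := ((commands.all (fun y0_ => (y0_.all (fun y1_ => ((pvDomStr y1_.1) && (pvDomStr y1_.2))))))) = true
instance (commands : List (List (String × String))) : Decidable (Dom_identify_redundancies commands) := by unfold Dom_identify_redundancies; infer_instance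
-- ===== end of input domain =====

-- B makes ONE pass over `commands`, filling all category accumulators and the name→group table
-- together, instead of A's six independent scans; same return value (objective: alternative/faster constant factor).

-- shared helper: cmd['command'] (first match in the association list; Pre_ guarantees the key exists)
def pvGetCmd (cmd : List (String × String)) : String :=
  (PySem.Dict.mk cmd).getD "command" ""

-- ===== PORT A =====
def identify_redundancies (commands : List (List (String × String))) : List (String × List (List (String × String))) :=
  let redundancies : PySem.Dict String (List (List (String × String))) :=
    PySem.Dict.ofList [("task_creation", []), ("task_listing", []), ("search_commands", []),
                       ("analytics_hierarchy", []), ("namespace_conflicts", []), ("similar_functionality", [])]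
  let command_groups : PySem.Dict String (List (List (String × String))) :=
    commands.foldl (fun d cmd => d.modify (pvGetCmd cmd) [] (· ++ [cmd])) PySem.Dict.empty
  let add_commands := commands.filter (fun cmd => ["/add", "/addtask"].contains (pvGetCmd cmd))
  let redundancies := if 2 ≤ add_commands.length then redundancies.insert "task_creation" add_commands else redundancies
  let list_commands := commands.filter (fun cmd => ["/list", "/tasks"].contains (pvGetCmd cmd))
  let redundancies := if 2 ≤ list_commands.length then redundancies.insert "task_listing" list_commands else redundancies
  let search_commands := commands.filter (fun cmd => ["/search", "/search_advanced"].contains (pvGetCmd cmd))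
  let redundancies := if 2 ≤ search_commands.length then redundancies.insert "search_commands" search_commands else redundancies
  let analytics_commands := commands.filter (fun cmd => PySem.Str.isIn "/analytics" (pvGetCmd cmd))
  let redundancies := if 2 ≤ analytics_commands.length then redundancies.insert "analytics_hierarchy" analytics_commands else redundancies
  let redundancies := command_groups.items.foldl
    (fun d p => if 1 < p.2.length then d.modify "namespace_conflicts" [] (· ++ p.2) else d) redundancies
  let bulk_commands := commands.filter (fun cmd => PySem.Str.startswith (pvGetCmd cmd) "/bulk_")
  let redundancies := if 3 ≤ bulk_commands.length then redundancies.modify "similar_functionality" [] (· ++ bulk_commands) else redundancies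
  redundancies.items

-- ===== PORT B =====
def identify_redundancies_alt (commands : List (List (String × String))) : List (String × List (List (String × String))) :=
  let st := commands.foldl
    (fun st cmd =>
      let name := pvGetCmd cmd
      ( if ["/add", "/addtask"].contains name then st.1 ++ [cmd] else st.1,
        if ["/list", "/tasks"].contains name then st.2.1 ++ [cmd] else st.2.1,
        if ["/search", "/search_advanced"].contains name then st.2.2.1 ++ [cmd] else st.2.2.1,
        if PySem.Str.isIn "/analytics" name then st.2.2.2.1 ++ [cmd] else st.2.2.2.1,
        if PySem.Str.startswith name "/bulk_" then st.2.2.2.2.1 ++ [cmd] else st.2.2.2.2.1,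
        st.2.2.2.2.2.modify name [] (· ++ [cmd]) ))
    (([], [], [], [], [], PySem.Dict.empty) :
      List (List (String × String)) × List (List (String × String)) × List (List (String × String)) ×
      List (List (String × String)) × List (List (String × String)) × PySem.Dict String (List (List (String × String))))
  let conflicts := st.2.2.2.2.2.items.foldl (fun acc p => if 1 < p.2.length then acc ++ p.2 else acc) []
  [ ("task_creation", if 2 ≤ st.1.length then st.1 else []),
    ("task_listing", if 2 ≤ st.2.1.length then st.2.1 else []),
    ("search_commands", if 2 ≤ st.2.2.1.length then st.2.2.1 else []),
    ("analytics_hierarchy", if 2 ≤ st.2.2.2.1.length then st.2.2.2.1 else []),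
    ("namespace_conflicts", conflicts),
    ("similar_functionality", if 3 ≤ st.2.2.2.2.1.length then st.2.2.2.2.1 else []) ]

-- ===== PRECONDITION & SPEC =====
-- Pre_ excludes exactly the inputs where some command dict lacks the key 'command' (A raises KeyError there).
def Pre_identify_redundancies (commands : List (List (String × String))) : Prop :=
  (commands.all (fun cmd => cmd.any (fun p => p.1 == "command"))) = true
instance (commands : List (List (String × String))) : Decidable (Pre_identify_redundancies commands) := by unfold Pre_identify_redundancies; infer_instance
def pvWitness_identify_redundancies : (List (List (String × String))) :=
  [[("command", "/add")], [("command", "/addtask")]]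

def Spec_identify_redundancies (commands : List (List (String × String))) (out : List (String × List (List (String × String)))) : Prop := out = identify_redundancies_alt commands
instance (commands : List (List (String × String))) (out : List (String × List (List (String × String)))) : Decidable (Spec_identify_redundancies commands out) := by unfold Spec_identify_redundancies; infer_instance

-- ===== CLAIM (what is proved, stated in full; the proofs are below) =====
def Claim_equal_identify_redundancies : Prop := ∀ (commands : List (List (String × String))), Dom_identify_redundancies commands → Pre_identify_redundancies commands → Spec_identify_redundancies commands (identify_redundancies commands)

-- ===== LEMMAS AND PROOFS =====

-- the 6-key result dict of A, with symbolic values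
def pvMk6 (v1 v2 v3 v4 v5 v6 : List (List (String × String))) : PySem.Dict String (List (List (String × String))) :=
  PySem.Dict.mk [("task_creation", v1), ("task_listing", v2), ("search_commands", v3),
                 ("analytics_hierarchy", v4), ("namespace_conflicts", v5), ("similar_functionality", v6)]

theorem pvMk6_ofList (v1 v2 v3 v4 v5 v6 : List (List (String × String))) :
    PySem.Dict.ofList [("task_creation", v1), ("task_listing", v2), ("search_commands", v3),
                       ("analytics_hierarchy", v4), ("namespace_conflicts", v5), ("similar_functionality", v6)]
      = pvMk6 v1 v2 v3 v4 v5 v6 := rfl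

theorem pvMk6_ins1 (v1 v2 v3 v4 v5 v6 w : List (List (String × String))) :
    (pvMk6 v1 v2 v3 v4 v5 v6).insert "task_creation" w = pvMk6 w v2 v3 v4 v5 v6 := rfl
theorem pvMk6_ins2 (v1 v2 v3 v4 v5 v6 w : List (List (String × String))) :
    (pvMk6 v1 v2 v3 v4 v5 v6).insert "task_listing" w = pvMk6 v1 w v3 v4 v5 v6 := rfl
theorem pvMk6_ins3 (v1 v2 v3 v4 v5 v6 w : List (List (String × String))) :
    (pvMk6 v1 v2 v3 v4 v5 v6).insert "search_commands" w = pvMk6 v1 v2 w v4 v5 v6 := rfl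
theorem pvMk6_ins4 (v1 v2 v3 v4 v5 v6 w : List (List (String × String))) :
    (pvMk6 v1 v2 v3 v4 v5 v6).insert "analytics_hierarchy" w = pvMk6 v1 v2 v3 w v5 v6 := rfl
theorem pvMk6_mod5 (v1 v2 v3 v4 v5 v6 : List (List (String × String))) (f : List (List (String × String)) → List (List (String × String))) :
    (pvMk6 v1 v2 v3 v4 v5 v6).modify "namespace_conflicts" [] f = pvMk6 v1 v2 v3 v4 (f v5) v6 := rfl
theorem pvMk6_mod6 (v1 v2 v3 v4 v5 v6 : List (List (String × String))) (f : List (List (String × String)) → List (List (String × String))) :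
    (pvMk6 v1 v2 v3 v4 v5 v6).modify "similar_functionality" [] f = pvMk6 v1 v2 v3 v4 v5 (f v6) := rfl
theorem pvMk6_items (v1 v2 v3 v4 v5 v6 : List (List (String × String))) :
    (pvMk6 v1 v2 v3 v4 v5 v6).items =
      [("task_creation", v1), ("task_listing", v2), ("search_commands", v3),
       ("analytics_hierarchy", v4), ("namespace_conflicts", v5), ("similar_functionality", v6)] := rfl

-- A's namespace-conflicts loop only accumulates into the fifth slot
theorem pvNsFold (l : List (String × List (List (String × String)))) (v1 v2 v3 v4 v5 v6 : List (List (String × String))) :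
    l.foldl (fun d p => if 1 < p.2.length then d.modify "namespace_conflicts" [] (· ++ p.2) else d)
        (pvMk6 v1 v2 v3 v4 v5 v6)
      = pvMk6 v1 v2 v3 v4 (l.foldl (fun acc p => if 1 < p.2.length then acc ++ p.2 else acc) v5) v6 := by
  induction l generalizing v5 with
  | nil => rfl
  | cons p l ih =>
    simp only [List.foldl_cons]
    by_cases h : 1 < p.2.length
    · rw [if_pos h, pvMk6_mod5, ih, if_pos h]
    · rw [if_neg h, ih, if_neg h]

-- B's single pass computes exactly A's five filters and A's grouping dict
theorem pvFoldSplit (cs : List (List (String × String)))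
    (a b c d e : List (List (String × String))) (g : PySem.Dict String (List (List (String × String)))) :
    cs.foldl
      (fun st cmd =>
        let name := pvGetCmd cmd
        ( if ["/add", "/addtask"].contains name then st.1 ++ [cmd] else st.1,
          if ["/list", "/tasks"].contains name then st.2.1 ++ [cmd] else st.2.1,
          if ["/search", "/search_advanced"].contains name then st.2.2.1 ++ [cmd] else st.2.2.1,
          if PySem.Str.isIn "/analytics" name then st.2.2.2.1 ++ [cmd] else st.2.2.2.1,
          if PySem.Str.startswith name "/bulk_" then st.2.2.2.2.1 ++ [cmd] else st.2.2.2.2.1,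
          st.2.2.2.2.2.modify name [] (· ++ [cmd]) ))
      (a, b, c, d, e, g)
    = ( a ++ cs.filter (fun cmd => ["/add", "/addtask"].contains (pvGetCmd cmd)),
        b ++ cs.filter (fun cmd => ["/list", "/tasks"].contains (pvGetCmd cmd)),
        c ++ cs.filter (fun cmd => ["/search", "/search_advanced"].contains (pvGetCmd cmd)),
        d ++ cs.filter (fun cmd => PySem.Str.isIn "/analytics" (pvGetCmd cmd)),
        e ++ cs.filter (fun cmd => PySem.Str.startswith (pvGetCmd cmd) "/bulk_"),
        cs.foldl (fun d cmd => d.modify (pvGetCmd cmd) [] (· ++ [cmd])) g ) := by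
  induction cs generalizing a b c d e g with
  | nil => simp
  | cons x cs ih =>
    simp only [List.foldl_cons, List.filter_cons, ih]
    split_ifs <;> simp

-- ===== VERDICT (by name: the statement is the Claim_ definition above) =====
theorem identify_redundancies_spec : Claim_equal_identify_redundancies := by
  intro commands _ _
  unfold Spec_identify_redundancies identify_redundancies identify_redundancies_alt
  rw [pvFoldSplit]
  simp only [List.nil_append, pvMk6_ofList]
  split_ifs <;>
    simp only [pvMk6_ins1, pvMk6_ins2, pvMk6_ins3, pvMk6_ins4, pvMk6_mod6, pvNsFold, pvMk6_items,
      List.nil_append]
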